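-- pv_equiv track=rewrite | github.com/samurai164/Isotopic-Purity-Calculation-Program | Isotopic Purity Calculation Program.py | tongji
-- ===== SOURCE A (Python) =====
-- def tongji(cm,a,c,e):
--     ai = []
--     ci = []
--     ei = []
--     for l in range(a, -1, -1):
--         for k, ii in enumerate(cm):
--             if ii[0] == a - l:
--                 ai.append({"a{}".format(a - l): k})
--
--     for l in range(c, -1, -1):
--         for k, ii in enumerate(cm):
--             if ii[1] == c - l:
--                 ci.append({"c{}".format(c - l): k})
--
--     for l in range(e, -1, -1):
--         for k, ii in enumerate(cm):
--             if ii[2] == e - l: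
--                 ei.append({"e{}".format(e - l): k})
--
--     return  tongji_d(ai),tongji_d(ci),tongji_d(ei)
--
-- def tongji_d(ai):
--     merged_data_key = []
--     merged_data_values = []
--     for d in ai:
--         for key, value in d.items():
--             if key not in merged_data_key:
--                 merged_data_key.append(key)
--     for dvi in merged_data_key:
--         merged_data_value = []
--         for dv in ai:
--             for key1, value1 in dv.items():
--                 if dvi == key1:
--                     merged_data_value.append(value1)
--         merged_data_values.append(merged_data_value)
--     return merged_data_key,merged_data_values
-- ===== SOURCE B (Python) =====
-- def tongji(cm, a, c, e):
--     return _bucket(cm, 0, a, "a"), _bucket(cm, 1, c, "c"), _bucket(cm, 2, e, "e")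
--
-- def _bucket(cm, j, bound, prefix):
--     keys = []
--     vals = []
--     if bound < 0:
--         return keys, vals
--     groups = {}
--     for k, row in enumerate(cm):
--         v = row[j]
--         if 0 <= v <= bound:
--             groups[v] = groups.get(v, []) + [k]
--     for v in sorted(groups):
--         keys.append(prefix + str(v))
--         vals.append(groups[v])
--     return keys, vals
-- ===== Notes on version B (the rewrite author's own statement) =====
-- stated objective: faster
-- what changed: Instead of scanning all of cm once per candidate value 0..bound and then re-scanning the collected dicts once per distinct key, B makes a single pass over cm bucketing row indices into a dict keyed by the coordinate value and emits the buckets in sorted key order.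
import Mathlib
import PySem

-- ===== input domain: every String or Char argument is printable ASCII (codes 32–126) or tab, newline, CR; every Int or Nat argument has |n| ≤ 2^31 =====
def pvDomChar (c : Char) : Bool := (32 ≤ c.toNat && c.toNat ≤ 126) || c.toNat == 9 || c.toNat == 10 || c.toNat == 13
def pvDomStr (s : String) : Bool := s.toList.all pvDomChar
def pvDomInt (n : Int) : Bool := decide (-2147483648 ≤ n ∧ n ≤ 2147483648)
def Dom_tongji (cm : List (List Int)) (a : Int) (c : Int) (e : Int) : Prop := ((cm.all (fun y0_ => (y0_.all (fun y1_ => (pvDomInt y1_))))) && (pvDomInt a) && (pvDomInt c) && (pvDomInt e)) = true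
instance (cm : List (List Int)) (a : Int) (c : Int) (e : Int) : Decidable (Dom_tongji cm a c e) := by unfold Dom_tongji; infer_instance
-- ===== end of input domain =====

-- B replaces A's per-candidate-value rescans of cm (and tongji_d's per-key rescans) by one
-- bucketing pass over cm into a dict keyed by the coordinate value, emitted in sorted key order.

-- ===== PORT A =====
-- "x{}".format(v) with a one-character prefix x (shared by both ports, which both build prefix+str(v))
def pvKey (p : Char) (v : Int) : String := String.ofList (p :: PySem.Int.toChars v)

-- A's three collection loops are identical up to (bound, prefix char, column); ported once, applied three times.
def pvAxisA (cm : List (List Int)) (b : Int) (p : Char) (j : Int) : List (PySem.Dict String Int) :=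
  (PySem.List.pyRange b (-1) (-1)).foldl (fun acc l =>
    (PySem.List.enumerate cm).foldl (fun acc2 ki =>
      if PySem.List.pyGet? ki.2 j = some (b - l) then
        acc2 ++ [PySem.Dict.ofList [(pvKey p (b - l), ki.1)]]
      else acc2) acc) []

-- literal port of helper tongji_d
def pvTongjiD (ai : List (PySem.Dict String Int)) : List String × List (List Int) :=
  let mdk := ai.foldl (fun ks d =>
    d.items.foldl (fun ks kv => if ks.contains kv.1 then ks else ks ++ [kv.1]) ks) []
  let mdvs := mdk.foldl (fun acc dvi =>
    acc ++ [ai.foldl (fun mv dv =>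
      dv.items.foldl (fun mv kv => if dvi == kv.1 then mv ++ [kv.2] else mv) mv) []]) []
  (mdk, mdvs)

def tongji (cm : List (List Int)) (a : Int) (c : Int) (e : Int) :
    (List String × List (List Int)) × (List String × List (List Int)) × (List String × List (List Int)) :=
  (pvTongjiD (pvAxisA cm a 'a' 0), pvTongjiD (pvAxisA cm c 'c' 1), pvTongjiD (pvAxisA cm e 'e' 2))

-- ===== PORT B =====
-- literal port of helper _bucket from Source B (groups[v] = groups.get(v, []) + [k] is Dict.modify)
def pvBucketAlt (cm : List (List Int)) (j : Int) (b : Int) (p : Char) : List String × List (List Int) :=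
  if b < 0 then ([], [])
  else
    let groups := (PySem.List.enumerate cm).foldl (fun (g : PySem.Dict Int (List Int)) ki =>
      match PySem.List.pyGet? ki.2 j with
      | some v => if 0 ≤ v ∧ v ≤ b then g.modify v [] (· ++ [ki.1]) else g
      | none => g) PySem.Dict.empty
    (PySem.List.sorted groups.keys (fun x => x) false).foldl
      (fun kv v => (kv.1 ++ [pvKey p v], kv.2 ++ [groups.getD v []])) ([], [])

def tongji_alt (cm : List (List Int)) (a : Int) (c : Int) (e : Int) :
    (List String × List (List Int)) × (List String × List (List Int)) × (List String × List (List Int)) :=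
  (pvBucketAlt cm 0 a 'a', pvBucketAlt cm 1 c 'c', pvBucketAlt cm 2 e 'e')

-- ===== PRECONDITION & SPEC =====
-- Python A raises IndexError on rows shorter than the columns it reads (column 0/1/2 is read only
-- when the corresponding bound is ≥ 0); Pre_ excludes exactly those inputs.
def Pre_tongji (cm : List (List Int)) (a : Int) (c : Int) (e : Int) : Prop :=
  (0 ≤ a → ∀ r ∈ cm, 1 ≤ r.length) ∧ (0 ≤ c → ∀ r ∈ cm, 2 ≤ r.length) ∧ (0 ≤ e → ∀ r ∈ cm, 3 ≤ r.length)
instance (cm : List (List Int)) (a : Int) (c : Int) (e : Int) : Decidable (Pre_tongji cm a c e) := by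
  unfold Pre_tongji; infer_instance

def pvWitness_tongji : List (List Int) × Int × Int × Int := ([[0, 1, 2], [1, 1, 0]], 1, 1, 2)

def Spec_tongji (cm : List (List Int)) (a : Int) (c : Int) (e : Int) (out : (List String × List (List Int)) × (List String × List (List Int)) × (List String × List (List Int))) : Prop := out = tongji_alt cm a c e
instance (cm : List (List Int)) (a : Int) (c : Int) (e : Int) (out : (List String × List (List Int)) × (List String × List (List Int)) × (List String × List (List Int))) : Decidable (Spec_tongji cm a c e out) := by unfold Spec_tongji; infer_instance

-- ===== CLAIM (what is proved, stated in full; the proofs are below) =====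
def Claim_equal_tongji : Prop := ∀ (cm : List (List Int)) (a : Int) (c : Int) (e : Int), Dom_tongji cm a c e → Pre_tongji cm a c e → Spec_tongji cm a c e (tongji cm a c e)

-- ===== LEMMAS AND PROOFS =====

-- row indices of cm whose column j holds value v, in row order
def pvIdxs (cm : List (List Int)) (j v : Int) : List Int :=
  ((PySem.List.enumerate cm).filter (fun ki => decide (PySem.List.pyGet? ki.2 j = some v))).map (fun ki => ki.1)

-- the candidate values 0, 1, …, b
def pvVs (b : Int) : List Int := (List.range (b + 1).toNat).map (fun k => Int.ofNat k)

-- the candidate values that occur in column j, ascending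
def pvPresent (cm : List (List Int)) (j b : Int) : List Int :=
  (pvVs b).filter (fun v => decide (pvIdxs cm j v ≠ []))

-- ---- decimal-digit injectivity (str(v) is injective on nonnegative v) ----

theorem pv_digitChar_inj {m n : Nat} (hm : m < 10) (hn : n < 10)
    (h : Nat.digitChar m = Nat.digitChar n) : m = n := by
  interval_cases m <;> interval_cases n <;> simp_all [Nat.digitChar]

theorem pv_core_acc (b : Nat) : ∀ (f n : Nat) (ds : List Char),
    Nat.toDigitsCore b f n ds = Nat.toDigitsCore b f n [] ++ ds := by
  intro f
  induction f with
  | zero => intro n ds; simp [Nat.toDigitsCore]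
  | succ f ih =>
    intro n ds
    simp only [Nat.toDigitsCore]
    by_cases h : n / b = 0
    · simp [h]
    · simp only [if_neg h]
      rw [ih (n / b) ((n % b).digitChar :: ds), ih (n / b) [(n % b).digitChar]]
      simp

theorem pv_core_fuel : ∀ (n : Nat), ∀ (f f' : Nat), n < f → n < f' →
    Nat.toDigitsCore 10 f n [] = Nat.toDigitsCore 10 f' n [] := by
  intro n
  induction n using Nat.strong_induction_on with
  | _ n ih =>
    intro f f' hf hf'
    obtain ⟨g, rfl⟩ : ∃ g, f = g + 1 := ⟨f - 1, by omega⟩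
    obtain ⟨g', rfl⟩ : ∃ g', f' = g' + 1 := ⟨f' - 1, by omega⟩
    simp only [Nat.toDigitsCore]
    by_cases h : n / 10 = 0
    · simp [h]
    · simp only [if_neg h]
      rw [pv_core_acc 10 g (n / 10), pv_core_acc 10 g' (n / 10)]
      have hlt : n / 10 < n := Nat.div_lt_self (by omega) (by omega)
      rw [ih (n / 10) hlt g g' (by omega) (by omega)]

theorem pv_toDigits_small {n : Nat} (h : n < 10) : Nat.toDigits 10 n = [Nat.digitChar n] := by
  simp only [Nat.toDigits, Nat.toDigitsCore]
  rw [if_pos (Nat.div_eq_of_lt h), Nat.mod_eq_of_lt h]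

theorem pv_toDigits_step {n : Nat} (h : 10 ≤ n) :
    Nat.toDigits 10 n = Nat.toDigits 10 (n / 10) ++ [Nat.digitChar (n % 10)] := by
  have h0 : n / 10 ≠ 0 := by
    have := (Nat.one_le_div_iff (show 0 < 10 by omega)).2 h; omega
  have e1 : Nat.toDigits 10 n = Nat.toDigitsCore 10 n (n / 10) [(n % 10).digitChar] := by
    simp only [Nat.toDigits]
    conv_lhs => rw [Nat.toDigitsCore]
    rw [if_neg h0]
  rw [e1, pv_core_acc 10 n (n / 10)]
  have hlt : n / 10 < n := Nat.div_lt_self (by omega) (by omega)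
  rw [pv_core_fuel (n / 10) n (n / 10 + 1) hlt (by omega)]
  rfl

theorem pv_toDigits_ne_nil (n : Nat) : Nat.toDigits 10 n ≠ [] := by
  by_cases h : n < 10
  · rw [pv_toDigits_small h]; simp
  · rw [pv_toDigits_step (by omega)]; simp

theorem pv_toDigits_inj : ∀ (n m : Nat), Nat.toDigits 10 n = Nat.toDigits 10 m → n = m := by
  intro n
  induction n using Nat.strong_induction_on with
  | _ n ih =>
    intro m h
    by_cases hn : n < 10 <;> by_cases hm : m < 10
    · rw [pv_toDigits_small hn, pv_toDigits_small hm] at h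
      exact pv_digitChar_inj hn hm (by injection h)
    · rw [pv_toDigits_small hn, pv_toDigits_step (by omega : 10 ≤ m)] at h
      have := congrArg List.length h
      simp at this
      exact absurd this (pv_toDigits_ne_nil (m / 10))
    · rw [pv_toDigits_step (by omega : 10 ≤ n), pv_toDigits_small hm] at h
      have := congrArg List.length h
      simp at this
      exact absurd this (pv_toDigits_ne_nil (n / 10))
    · rw [pv_toDigits_step (by omega : 10 ≤ n), pv_toDigits_step (by omega : 10 ≤ m)] at h
      have h2 := List.append_inj' h (by simp)
      have hdiv : n / 10 = m / 10 :=
        ih (n / 10) (Nat.div_lt_self (by omega) (by omega)) (m / 10) h2.1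
      have hmod : n % 10 = m % 10 := by
        have := h2.2
        simp at this
        exact pv_digitChar_inj (Nat.mod_lt _ (by omega)) (Nat.mod_lt _ (by omega)) this
      omega

theorem pvKey_inj {p : Char} {v w : Int} (hv : 0 ≤ v) (hw : 0 ≤ w)
    (h : pvKey p v = pvKey p w) : v = w := by
  have h1 := congrArg String.toList h
  simp only [pvKey, String.toList_ofList] at h1
  have h2 : PySem.Int.toChars v = PySem.Int.toChars w := by injection h1
  simp only [PySem.Int.toChars, if_neg (by omega : ¬ v < 0), if_neg (by omega : ¬ w < 0)] at h2
  have := pv_toDigits_inj v.toNat w.toNat h2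
  omega

-- ---- generic loop shapes ----

theorem pv_foldl_if_append {α β : Type} (L : List α) (P : α → Prop) [DecidablePred P]
    (f : α → β) (acc : List β) :
    L.foldl (fun acc x => if P x then acc ++ [f x] else acc) acc
      = acc ++ (L.filter (fun x => decide (P x))).map f := by
  induction L generalizing acc with
  | nil => simp
  | cons x t ih =>
    by_cases h : P x <;> simp [h, ih]

theorem pv_foldl_eq_flatMap_of_step {ι β : Type} (L : List ι) (step : List β → ι → List β)
    (h : ι → List β) (hs : ∀ acc l, step acc l = acc ++ h l) :
    ∀ acc, L.foldl step acc = acc ++ L.flatMap h := by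
  induction L with
  | nil => simp
  | cons x t ih => intro acc; simp [hs, ih, List.flatMap_cons]

theorem pv_flatMap_if_singleton {α β : Type} [DecidableEq α] (vs : List α) (v₀ : α)
    (h : α → List β) (hnd : vs.Nodup) (hmem : v₀ ∈ vs) :
    vs.flatMap (fun v => if v = v₀ then h v else []) = h v₀ := by
  induction vs with
  | nil => simp at hmem
  | cons x t ih =>
    simp only [List.flatMap_cons]
    rcases List.mem_cons.1 hmem with rfl | hm
    · have h0 : t.flatMap (fun v => if v = v₀ then h v else []) = [] := by
        apply List.flatMap_eq_nil_iff.2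
        intro v hv
        have : v ≠ v₀ := fun he => (List.nodup_cons.1 hnd).1 (he ▸ hv)
        simp [this]
      simp [h0]
    · have hx : x ≠ v₀ := fun he => (List.nodup_cons.1 hnd).1 (he ▸ hm)
      simp [hx, ih (List.nodup_cons.1 hnd).2 hm]

-- ---- facts about the candidate values and tongji_d's loops ----

theorem pv_mem_pvVs {b v : Int} : v ∈ pvVs b ↔ 0 ≤ v ∧ v ≤ b := by
  unfold pvVs
  simp only [Int.ofNat_eq_natCast, List.mem_map, List.mem_range]
  constructor
  · rintro ⟨k, hk, rfl⟩
    omega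
  · rintro ⟨h0, h1⟩
    exact ⟨v.toNat, by omega, by omega⟩

theorem pvVs_nodup (b : Int) : (pvVs b).Nodup := by
  unfold pvVs
  simp only [Int.ofNat_eq_natCast]
  apply List.Nodup.map ?_ List.nodup_range
  intro x y h
  simpa using h

theorem pvVs_nonneg {b v : Int} (h : v ∈ pvVs b) : 0 ≤ v :=
  (pv_mem_pvVs.1 h).1

-- the dedup step of tongji_d, one dict at a time

theorem pv_dd_single (ks : List String) (s : String) (k : Int) :
    (PySem.Dict.ofList [(s, k)]).items.foldl
        (fun ks (kv : String × Int) => if ks.contains kv.1 then ks else ks ++ [kv.1]) ks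
      = if ks.contains s then ks else ks ++ [s] := by
  rfl

theorem pv_dd_block (L : List Int) (s : String) (ks : List String) :
    (L.map (fun k => PySem.Dict.ofList [(s, k)])).foldl
        (fun ks d => d.items.foldl
          (fun ks (kv : String × Int) => if ks.contains kv.1 then ks else ks ++ [kv.1]) ks) ks
      = if L = [] then ks else (if ks.contains s then ks else ks ++ [s]) := by
  induction L generalizing ks with
  | nil => simp
  | cons k t ih =>
    simp only [List.map_cons, List.foldl_cons]
    rw [pv_dd_single]
    by_cases hc : ks.contains s = true
    · rw [if_pos hc, ih, if_neg (List.cons_ne_nil k t), if_pos hc]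
      split <;> rfl
    · rw [if_neg hc, ih, if_neg (List.cons_ne_nil k t)]
      have hc2 : (ks ++ [s]).contains s = true := by simp
      rw [if_pos hc2]
      split <;> rfl

theorem pv_mdk_gen (cm : List (List Int)) (j : Int) (p : Char) :
    ∀ (vs : List Int) (ks : List String), vs.Nodup → (∀ v ∈ vs, 0 ≤ v) →
      (∀ v ∈ vs, pvKey p v ∉ ks) →
      ((vs.flatMap (fun v => (pvIdxs cm j v).map (fun k => PySem.Dict.ofList [(pvKey p v, k)]))).foldl
          (fun ks d => d.items.foldl
            (fun ks (kv : String × Int) => if ks.contains kv.1 then ks else ks ++ [kv.1]) ks) ks)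
        = ks ++ (vs.filter (fun v => decide (pvIdxs cm j v ≠ []))).map (pvKey p) := by
  intro vs
  induction vs with
  | nil => simp
  | cons v t ih =>
    intro ks hnd hnn hks
    simp only [List.flatMap_cons, List.foldl_append]
    rw [pv_dd_block]
    by_cases he : pvIdxs cm j v = []
    · rw [if_pos he]
      rw [ih ks (List.nodup_cons.1 hnd).2 (fun w hw => hnn w (List.mem_cons_of_mem v hw))
          (fun w hw => hks w (List.mem_cons_of_mem v hw))]
      simp [he]
    · rw [if_neg he]
      have hnc : ks.contains (pvKey p v) ≠ true := by
        intro hm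
        exact hks v List.mem_cons_self (by simpa using hm)
      rw [if_neg hnc]
      rw [ih (ks ++ [pvKey p v]) (List.nodup_cons.1 hnd).2
          (fun w hw => hnn w (List.mem_cons_of_mem v hw))
          (fun w hw hmem => by
            rcases List.mem_append.1 hmem with hmem | hmem
            · exact hks w (List.mem_cons_of_mem v hw) hmem
            · have : pvKey p w = pvKey p v := by simpa using hmem
              have : w = v := pvKey_inj (hnn w (List.mem_cons_of_mem v hw))
                (hnn v List.mem_cons_self) this
              exact (List.nodup_cons.1 hnd).1 (this ▸ hw))]
      simp [he]

theorem pv_cstep_single (mv : List Int) (dvi s : String) (k : Int) :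
    (PySem.Dict.ofList [(s, k)]).items.foldl
        (fun mv (kv : String × Int) => if dvi == kv.1 then mv ++ [kv.2] else mv) mv
      = if dvi == s then mv ++ [k] else mv := by
  rfl

theorem pv_collect_block (L : List Int) (dvi s : String) (mv : List Int) :
    (L.map (fun k => PySem.Dict.ofList [(s, k)])).foldl
        (fun mv dv => dv.items.foldl
          (fun mv (kv : String × Int) => if dvi == kv.1 then mv ++ [kv.2] else mv) mv) mv
      = if dvi == s then mv ++ L else mv := by
  induction L generalizing mv with
  | nil => simp
  | cons k t ih =>
    simp only [List.map_cons, List.foldl_cons]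
    rw [pv_cstep_single]
    by_cases h : (dvi == s) = true
    · simp only [ih, if_pos h, List.append_assoc]
      rfl
    · simp only [ih, if_neg h]

theorem pv_collect_gen (cm : List (List Int)) (j : Int) (p : Char) (dvi : String) :
    ∀ (vs : List Int) (mv : List Int),
      ((vs.flatMap (fun v => (pvIdxs cm j v).map (fun k => PySem.Dict.ofList [(pvKey p v, k)]))).foldl
          (fun mv dv => dv.items.foldl
            (fun mv (kv : String × Int) => if dvi == kv.1 then mv ++ [kv.2] else mv) mv) mv)
        = mv ++ vs.flatMap (fun v => if dvi == pvKey p v then pvIdxs cm j v else []) := by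
  intro vs
  induction vs with
  | nil => simp
  | cons v t ih =>
    intro mv
    simp only [List.flatMap_cons, List.foldl_append]
    rw [pv_collect_block, ih]
    by_cases h : (dvi == pvKey p v) = true
    · simp [h, List.append_assoc]
    · simp [h]

theorem pv_collect_eq (cm : List (List Int)) (j : Int) (p : Char) (vs : List Int) (v₀ : Int)
    (hnd : vs.Nodup) (hnn : ∀ v ∈ vs, 0 ≤ v) (hmem : v₀ ∈ vs) :
    ((vs.flatMap (fun v => (pvIdxs cm j v).map (fun k => PySem.Dict.ofList [(pvKey p v, k)]))).foldl
        (fun mv dv => dv.items.foldl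
          (fun mv (kv : String × Int) => if pvKey p v₀ == kv.1 then mv ++ [kv.2] else mv) mv) [])
      = pvIdxs cm j v₀ := by
  rw [pv_collect_gen, List.nil_append]
  rw [List.flatMap_congr (g := fun v => if v = v₀ then pvIdxs cm j v else []) ?_]
  · exact pv_flatMap_if_singleton vs v₀ _ hnd hmem
  · intro v hv
    by_cases h : v = v₀
    · subst h
      simp
    · have h2 : (pvKey p v₀ == pvKey p v) ≠ true := by
        intro hb
        exact h (pvKey_inj (hnn v₀ hmem) (hnn v hv) (beq_iff_eq.1 hb)).symm
      simp [h2, h]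

-- ---- A-side characterisation ----

theorem pv_pyRange_down (b : Int) :
    PySem.List.pyRange b (-1) (-1) = (List.range (b + 1).toNat).map (fun k : Nat => b - (k : Int)) := by
  simp only [PySem.List.pyRange]
  norm_num
  by_cases h : -1 < b
  · rw [if_pos h]
    apply List.map_congr_left
    intro k _
    omega
  · rw [if_neg h]
    have h0 : (b + 1).toNat = 0 := by omega
    simp [h0]

theorem pv_axisA_eq (cm : List (List Int)) (b : Int) (p : Char) (j : Int) :
    pvAxisA cm b p j
      = (pvVs b).flatMap (fun v => (pvIdxs cm j v).map (fun k => PySem.Dict.ofList [(pvKey p v, k)])) := by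
  unfold pvAxisA
  rw [pv_foldl_eq_flatMap_of_step _ _
      (fun l => (pvIdxs cm j (b - l)).map (fun k => PySem.Dict.ofList [(pvKey p (b - l), k)]))
      (fun acc l => by
        rw [pv_foldl_if_append (PySem.List.enumerate cm)
            (fun ki => PySem.List.pyGet? ki.2 j = some (b - l))
            (fun ki => PySem.Dict.ofList [(pvKey p (b - l), ki.1)]) acc]
        simp [pvIdxs])]
  rw [pv_pyRange_down, List.nil_append]
  rw [List.flatMap_map]
  unfold pvVs
  rw [List.flatMap_map]
  refine List.flatMap_congr ?_
  intro k _
  simp only [Int.ofNat_eq_natCast]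
  have : b - (b - (k : Int)) = (k : Int) := by omega
  rw [this]

theorem pv_tongjiD_A (cm : List (List Int)) (b : Int) (p : Char) (j : Int) :
    pvTongjiD (pvAxisA cm b p j)
      = ((pvPresent cm j b).map (pvKey p), (pvPresent cm j b).map (pvIdxs cm j)) := by
  rw [pv_axisA_eq]
  simp only [pvTongjiD]
  have hmdk := pv_mdk_gen cm j p (pvVs b) [] (pvVs_nodup b)
    (fun v hv => pvVs_nonneg hv) (fun v _ hv => (List.not_mem_nil hv))
  rw [List.nil_append] at hmdk
  rw [hmdk]
  refine Prod.ext rfl ?_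
  rw [PySem.List.foldl_append_singleton_eq_map, List.nil_append, List.map_map]
  apply List.map_congr_left
  intro v hv
  have hvs : v ∈ pvVs b := List.mem_of_mem_filter hv
  exact pv_collect_eq cm j p (pvVs b) v (pvVs_nodup b) (fun w hw => pvVs_nonneg hw) hvs

-- ---- B-side characterisation ----

-- the (value, row-index) pairs B's bucketing loop actually inserts
def pvH (j b : Int) (ki : Int × List Int) : Option (Int × Int) :=
  match PySem.List.pyGet? ki.2 j with
  | some v => if 0 ≤ v ∧ v ≤ b then some (v, ki.1) else none
  | none => none

def pvPairs (cm : List (List Int)) (j b : Int) : List (Int × Int) :=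
  (PySem.List.enumerate cm).filterMap (pvH j b)

theorem pv_pairs_filter (cm : List (List Int)) (j b v : Int) (h0 : 0 ≤ v) (h1 : v ≤ b) :
    ((pvPairs cm j b).filter (fun q => q.1 == v)).map (fun q => q.2) = pvIdxs cm j v := by
  unfold pvPairs pvIdxs
  induction PySem.List.enumerate cm with
  | nil => rfl
  | cons ki t ih =>
    rw [List.filterMap_cons, List.filter_cons]
    rcases hk : PySem.List.pyGet? ki.2 j with _ | w
    · have hH : pvH j b ki = none := by simp [pvH, hk]
      rw [hH, ih]
      simp
    · have hH : pvH j b ki = (if 0 ≤ w ∧ w ≤ b then some (w, ki.1) else none) := by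
        simp [pvH, hk]
      rw [hH]
      by_cases hc : 0 ≤ w ∧ w ≤ b
      · rw [if_pos hc, List.filter_cons]
        by_cases hw : w = v
        · subst hw
          rw [if_pos (by simp), List.map_cons, ih]
          simp
        · rw [if_neg (by simpa using hw), ih]
          simp [hw]
      · rw [if_neg hc, ih]
        have hw : w ≠ v := fun he => hc (he ▸ ⟨h0, h1⟩)
        simp [hw]

theorem pv_mem_pairs_fst (cm : List (List Int)) (j b v : Int) :
    v ∈ (pvPairs cm j b).map (fun q => q.1) ↔ v ∈ pvPresent cm j b := by
  unfold pvPresent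
  rw [List.mem_filter]
  rw [pv_mem_pvVs]
  unfold pvPairs
  simp only [List.mem_map, List.mem_filterMap]
  constructor
  · rintro ⟨q, ⟨ki, hki, hh⟩, rfl⟩
    rcases hk : PySem.List.pyGet? ki.2 j with _ | w
    · rw [show pvH j b ki = none from by simp [pvH, hk]] at hh
      exact absurd hh (by simp)
    · rw [show pvH j b ki = (if 0 ≤ w ∧ w ≤ b then some (w, ki.1) else none) from by
        simp [pvH, hk]] at hh
      by_cases hc : 0 ≤ w ∧ w ≤ b
      · rw [if_pos hc] at hh
        obtain rfl := Option.some.inj hh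
        refine ⟨hc, ?_⟩
        simp only [pvIdxs, ne_eq, List.map_eq_nil_iff, List.filter_eq_nil_iff, decide_eq_true_eq]
        push_neg
        exact ⟨ki, hki, by simp [hk]⟩
      · rw [if_neg hc] at hh; exact absurd hh (by simp)
  · rintro ⟨⟨h0, h1⟩, hne⟩
    simp only [pvIdxs, ne_eq, List.map_eq_nil_iff, List.filter_eq_nil_iff, decide_eq_true_eq] at hne
    push_neg at hne
    obtain ⟨ki, hki, hv⟩ := hne
    exact ⟨(v, ki.1), ⟨ki, hki, by simp [pvH, hv, h0, h1]⟩, rfl⟩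

theorem pvPresent_nodup (cm : List (List Int)) (j b : Int) : (pvPresent cm j b).Nodup :=
  (pvVs_nodup b).filter _

theorem pvPresent_pairwise (cm : List (List Int)) (j b : Int) :
    (pvPresent cm j b).Pairwise (fun x y => x < y) := by
  apply List.Pairwise.filter
  unfold pvVs
  apply List.pairwise_map.2
  apply List.Pairwise.imp ?_ (List.pairwise_lt_range)
  intro x y h
  simpa using h

theorem pv_bucketAlt_eq (cm : List (List Int)) (j b : Int) (p : Char) :
    pvBucketAlt cm j b p
      = ((pvPresent cm j b).map (pvKey p), (pvPresent cm j b).map (pvIdxs cm j)) := by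
  simp only [pvBucketAlt]
  by_cases hb : b < 0
  · rw [if_pos hb]
    have hvs : pvVs b = [] := by
      unfold pvVs
      have : (b + 1).toNat = 0 := by omega
      simp [this]
    simp [pvPresent, hvs]
  · rw [if_neg hb]
    have hstep : (fun (g : PySem.Dict Int (List Int)) (ki : Int × List Int) =>
        match PySem.List.pyGet? ki.2 j with
        | some v => if 0 ≤ v ∧ v ≤ b then g.modify v [] (· ++ [ki.1]) else g
        | none => g)
      = (fun (g : PySem.Dict Int (List Int)) (ki : Int × List Int) =>
          match pvH j b ki with
          | some q => g.modify q.1 [] (· ++ [q.2])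
          | none => g) := by
      funext g ki
      unfold pvH
      rcases PySem.List.pyGet? ki.2 j with _ | w
      · rfl
      · by_cases hc : 0 ≤ w ∧ w ≤ b
        · simp [hc]
        · simp [hc]
    rw [hstep]
    rw [show (PySem.List.enumerate cm).foldl
        (fun (g : PySem.Dict Int (List Int)) (ki : Int × List Int) =>
          match pvH j b ki with
          | some q => g.modify q.1 [] (· ++ [q.2])
          | none => g) PySem.Dict.empty
      = (pvPairs cm j b).foldl (fun g q => g.modify q.1 [] (· ++ [q.2])) PySem.Dict.empty
      from by
        unfold pvPairs
        rw [List.foldl_filterMap]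
        congr 1
        funext g ki
        rcases pvH j b ki with _ | q <;> rfl]
    have hkeys : ((pvPairs cm j b).foldl
        (fun (g : PySem.Dict Int (List Int)) q => g.modify q.1 [] (· ++ [q.2]))
          PySem.Dict.empty).keys
        = PySem.Set.ofList ((pvPairs cm j b).map (fun q => q.1)) := by
      rw [PySem.Dict.keys_foldl_modify_key (pvPairs cm j b) (fun q => q.1) []
          (fun _ q => (· ++ [q.2])) PySem.Dict.empty]
      rw [PySem.Dict.keys_empty, PySem.Set.update_nil_left]
    rw [hkeys]
    have hsorted : PySem.List.sorted (PySem.Set.ofList ((pvPairs cm j b).map (fun q => q.1)))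
        (fun x => x) false = pvPresent cm j b := by
      apply PySem.List.sorted_eq_of_perm_of_pairwise_lt
      · rw [List.perm_ext_iff_of_nodup (pvPresent_nodup cm j b) (PySem.Set.nodup_ofList _)]
        intro v
        rw [PySem.Set.mem_ofList, pv_mem_pairs_fst]
      · exact pvPresent_pairwise cm j b
    rw [hsorted]
    rw [PySem.List.foldl_prod_mk (f := fun acc v => acc ++ [pvKey p v])
        (g := fun acc v => acc ++ [((pvPairs cm j b).foldl
          (fun (g : PySem.Dict Int (List Int)) q => g.modify q.1 [] (· ++ [q.2]))
            PySem.Dict.empty).getD v []])]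
    rw [PySem.List.foldl_append_singleton_eq_map, PySem.List.foldl_append_singleton_eq_map,
        List.nil_append, List.nil_append]
    refine Prod.ext rfl ?_
    apply List.map_congr_left
    intro v hv
    have hm := pv_mem_pvVs.1 (List.mem_of_mem_filter hv)
    rw [PySem.Dict.getD_foldl_modify_append (pvPairs cm j b) PySem.Dict.empty v]
    rw [PySem.Dict.getD_empty, List.nil_append]
    exact pv_pairs_filter cm j b v hm.1 hm.2

-- ===== VERDICT (by name: the statement is the Claim_ definition above) =====
theorem tongji_spec : Claim_equal_tongji := by
  intro cm a c e _hdom _hpre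
  unfold Spec_tongji tongji tongji_alt
  rw [pv_tongjiD_A cm a 'a' 0, pv_tongjiD_A cm c 'c' 1, pv_tongjiD_A cm e 'e' 2,
      pv_bucketAlt_eq cm 0 a 'a', pv_bucketAlt_eq cm 1 c 'c', pv_bucketAlt_eq cm 2 e 'e']
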